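-- pv_equiv track=rewrite | github.com/yuichiinumaru/overpowers | skills/security/auth/mlidpassport/scripts/main.py | format_passport_recognize_infos
-- ===== SOURCE A (Python) =====
-- def format_passport_recognize_infos(infos: dict) -> dict:
--     """格式化信息区(视读区)证件内容。"""
--     if not infos:
--         return {}
--
--     fields = [
--         ("Type", "证件类型"),
--         ("IssuingCountry", "发行国家"),
--         ("PassportID", "护照号码"),
--         ("Surname", "姓"),
--         ("GivenName", "名"),
--         ("Name", "姓名"),
--         ("Nationality", "国籍"),
--         ("DateOfBirth", "出生日期"),
--         ("Sex", "性别"),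
--         ("DateOfIssuance", "发行日期"),
--         ("DateOfExpiration", "截止日期"),
--         ("Signature", "持证人签名"),
--         ("IssuePlace", "签发地点"),
--         ("IssuingAuthority", "签发机关"),
--     ]
--
--     output = {}
--     for key, _label in fields:
--         val = infos.get(key)
--         if val is not None and val != "":
--             output[key] = val
--
--     return output
-- ===== SOURCE B (Python) =====
-- FIELD_KEYS = (
--     "Type", "IssuingCountry", "PassportID", "Surname", "GivenName",
--     "Name", "Nationality", "DateOfBirth", "Sex", "DateOfIssuance",
--     "DateOfExpiration", "Signature", "IssuePlace", "IssuingAuthority",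
-- )
-- ORDER = {k: i for i, k in enumerate(FIELD_KEYS)}
--
--
-- def format_passport_recognize_infos(infos: dict) -> dict:
--     """格式化信息区(视读区)证件内容。"""
--     picked = []
--     for k, v in infos.items():
--         i = ORDER.get(k)
--         if i is not None and v != "":
--             picked.append((i, k, v))
--     picked.sort(key=lambda t: t[0])
--     return {k: v for _, k, v in picked}
-- ===== Notes on version B (the rewrite author's own statement) =====
-- stated objective: alternative
-- what changed: B replaces A's per-field dict probing with a single pass over infos.items() that tags each valid non-empty entry with its field index from a precomputed key->index map, then sorts the tagged entries by index to recover the canonical field order.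
import Mathlib
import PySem

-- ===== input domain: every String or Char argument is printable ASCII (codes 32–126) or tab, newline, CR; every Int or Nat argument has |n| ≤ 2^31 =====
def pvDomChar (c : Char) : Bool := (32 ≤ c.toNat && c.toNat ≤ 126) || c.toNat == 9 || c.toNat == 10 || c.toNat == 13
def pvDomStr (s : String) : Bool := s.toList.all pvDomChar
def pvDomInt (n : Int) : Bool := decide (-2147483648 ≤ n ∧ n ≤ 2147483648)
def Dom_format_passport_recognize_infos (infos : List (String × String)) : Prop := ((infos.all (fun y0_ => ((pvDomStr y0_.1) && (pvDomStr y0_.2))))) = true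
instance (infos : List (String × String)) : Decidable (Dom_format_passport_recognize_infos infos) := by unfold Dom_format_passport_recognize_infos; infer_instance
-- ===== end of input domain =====

-- B tags each kept (key, value) of infos with the field's index from a precomputed
-- key->index map and sorts the tags to recover the canonical field order
-- (alternative decomposition; not claimed faster).

-- ===== PORT A =====
-- the `fields` list of A (key, Chinese label)
def pvFields : List (String × String) :=
  [("Type", "证件类型"), ("IssuingCountry", "发行国家"), ("PassportID", "护照号码"),
   ("Surname", "姓"), ("GivenName", "名"), ("Name", "姓名"), ("Nationality", "国籍"),
   ("DateOfBirth", "出生日期"), ("Sex", "性别"), ("DateOfIssuance", "发行日期"),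
   ("DateOfExpiration", "截止日期"), ("Signature", "持证人签名"),
   ("IssuePlace", "签发地点"), ("IssuingAuthority", "签发机关")]

def format_passport_recognize_infos (infos : List (String × String)) : List (String × String) :=
  if infos = [] then []          -- if not infos: return {}
  else
    (pvFields.foldl (fun out kv =>
        match (PySem.Dict.mk infos).get? kv.1 with   -- val = infos.get(key)
        | some val => if val ≠ "" then out.insert kv.1 val else out   -- val is not None and val != ""
        | none => out)
      PySem.Dict.empty).items

-- ===== PORT B =====
-- FIELD_KEYS
def pvFieldKeys : List String :=
  ["Type", "IssuingCountry", "PassportID", "Surname", "GivenName", "Name", "Nationality",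
   "DateOfBirth", "Sex", "DateOfIssuance", "DateOfExpiration", "Signature",
   "IssuePlace", "IssuingAuthority"]

-- ORDER = {k: i for i, k in enumerate(FIELD_KEYS)}
def pvOrder : PySem.Dict String Int :=
  (PySem.List.enumerate pvFieldKeys).foldl (fun d p => d.insert p.2 p.1) PySem.Dict.empty

def format_passport_recognize_infos_alt (infos : List (String × String)) : List (String × String) :=
  -- for k, v in infos.items(): i = ORDER.get(k); if i is not None and v != "": picked.append((i, k, v))
  let picked : List (Int × String × String) :=
    infos.foldl (fun acc kv =>
      match pvOrder.get? kv.1 with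
      | some i => if kv.2 ≠ "" then acc ++ [(i, kv.1, kv.2)] else acc
      | none => acc) []
  -- picked.sort(key=lambda t: t[0])
  let sortedP := PySem.List.sorted picked (fun t => t.1) false
  -- {k: v for _, k, v in picked}
  (sortedP.foldl (fun d t => d.insert t.2.1 t.2.2) PySem.Dict.empty).items

-- ===== PRECONDITION & SPEC =====
-- Pre_ requires distinct keys: the association list encodes a Python dict, which cannot
-- hold duplicate keys, so every input A actually accepts satisfies it.
def Pre_format_passport_recognize_infos (infos : List (String × String)) : Prop :=
  (infos.map Prod.fst).Nodup
instance (infos : List (String × String)) : Decidable (Pre_format_passport_recognize_infos infos) := by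
  unfold Pre_format_passport_recognize_infos; infer_instance

def pvWitness_format_passport_recognize_infos : (List (String × String)) :=
  [("Surname", "X"), ("Hobby", "chess"), ("Type", "P")]

def Spec_format_passport_recognize_infos (infos : List (String × String)) (out : List (String × String)) : Prop := out = format_passport_recognize_infos_alt infos
instance (infos : List (String × String)) (out : List (String × String)) : Decidable (Spec_format_passport_recognize_infos infos out) := by unfold Spec_format_passport_recognize_infos; infer_instance

-- ===== CLAIM (what is proved, stated in full; the proofs are below) =====
def Claim_equal_format_passport_recognize_infos : Prop := ∀ (infos : List (String × String)), Dom_format_passport_recognize_infos infos → Pre_format_passport_recognize_infos infos → Spec_format_passport_recognize_infos infos (format_passport_recognize_infos infos)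

-- ===== LEMMAS AND PROOFS =====

-- the field (index, key) table, and the value-filter both programs apply
def pvIdx : List (Int × String) :=
  [(0, "Type"), (1, "IssuingCountry"), (2, "PassportID"), (3, "Surname"), (4, "GivenName"),
   (5, "Name"), (6, "Nationality"), (7, "DateOfBirth"), (8, "Sex"), (9, "DateOfIssuance"),
   (10, "DateOfExpiration"), (11, "Signature"), (12, "IssuePlace"), (13, "IssuingAuthority")]

-- what A keeps at a field key k: the value of infos there, filtered for non-emptiness
def pvG (infos : List (String × String)) (k : String) : Option String :=
  match (PySem.Dict.mk infos).get? k with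
  | some v => if v = "" then none else some v
  | none => none

-- B's first loop as a filterMap
def pvFB (kv : String × String) : Option (Int × String × String) :=
  match pvOrder.get? kv.1 with
  | some i => if kv.2 ≠ "" then some (i, kv.1, kv.2) else none
  | none => none

-- the canonical result, in field order, with indices attached
def pvTarget (infos : List (String × String)) : List (Int × String × String) :=
  pvIdx.filterMap (fun ik => (pvG infos ik.2).map (fun v => (ik.1, ik.2, v)))

lemma pvOrder_items : pvOrder.items = pvIdx.map (fun ik => (ik.2, ik.1)) := by decide

lemma pvOrder_keys_nodup : pvOrder.keys.Nodup := by decide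

lemma pvOrder_get?_iff (k : String) (i : Int) :
    pvOrder.get? k = some i ↔ (i, k) ∈ pvIdx := by
  rw [PySem.Dict.get?_eq_some_iff_mem_items pvOrder k i pvOrder_keys_nodup, pvOrder_items]
  constructor
  · intro h
    rcases List.mem_map.mp h with ⟨ik, hik, heq⟩
    cases ik
    cases heq
    exact hik
  · intro h; exact List.mem_map.mpr ⟨(i, k), h, rfl⟩

-- helper facts about the two filter functions
lemma pvFB_fst (kv : String × String) (x : Int × String × String) (h : pvFB kv = some x) :
    x.2.1 = kv.1 := by
  unfold pvFB at h
  cases ho : pvOrder.get? kv.1 <;> rw [ho] at h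
  · cases h
  · by_cases hv : kv.2 = "" <;> simp [hv] at h
    exact congrArg (fun t => t.2.1) h.symm

lemma pvTargetF_eq (infos : List (String × String)) (ik : Int × String) (x : Int × String × String)
    (h : (pvG infos ik.2).map (fun v => (ik.1, ik.2, v)) = some x) :
    x.1 = ik.1 ∧ x.2.1 = ik.2 := by
  cases hg : pvG infos ik.2 <;> rw [hg] at h
  · cases h
  · cases h; exact ⟨rfl, rfl⟩

-- a conditional-insert loop over fresh distinct keys appends its kept pairs
lemma foldl_condInsert_items (g : String → Option String) :
    ∀ (ks : List (String × String)) (out : PySem.Dict String String),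
      (ks.map Prod.fst).Nodup → (∀ kv ∈ ks, out.contains kv.1 = false) →
      (ks.foldl (fun out kv =>
          match g kv.1 with
          | some v => out.insert kv.1 v
          | none => out) out).items
        = out.items ++ ks.filterMap (fun kv => (g kv.1).map (fun v => (kv.1, v))) := by
  intro ks
  induction ks with
  | nil => intro out _ _; simp
  | cons kv rest ih =>
    intro out hnd hfresh
    simp only [List.map_cons, List.nodup_cons] at hnd
    simp only [List.foldl_cons, List.filterMap_cons]
    cases hg : g kv.1 with
    | none =>
      simp only [Option.map_none]
      exact ih out hnd.2 (fun x hx => hfresh x (List.mem_cons_of_mem kv hx))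
    | some v =>
      simp only [Option.map_some]
      have hout : (out.insert kv.1 v).items = out.items ++ [(kv.1, v)] :=
        PySem.Dict.items_insert_of_not_contains out v (hfresh kv List.mem_cons_self)
      have hfresh' : ∀ x ∈ rest, (out.insert kv.1 v).contains x.1 = false := by
        intro x hx
        have hne : x.1 ≠ kv.1 := fun h => hnd.1 (h ▸ List.mem_map_of_mem hx)
        rw [PySem.Dict.contains_eq_isSome_get?,
            PySem.Dict.get?_insert_of_ne out v hne,
            ← PySem.Dict.contains_eq_isSome_get?]
        exact hfresh x (List.mem_cons_of_mem kv hx)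
      rw [ih (out.insert kv.1 v) hnd.2 hfresh', hout]
      simp

-- B's first loop computes infos.filterMap pvFB
lemma picked_eq_filterMap (infos : List (String × String)) :
    infos.foldl (fun acc kv =>
      match pvOrder.get? kv.1 with
      | some i => if kv.2 ≠ "" then acc ++ [(i, kv.1, kv.2)] else acc
      | none => acc) [] = infos.filterMap pvFB := by
  have h : ∀ (l : List (String × String)) (acc : List (Int × String × String)),
      l.foldl (fun acc kv =>
        match pvOrder.get? kv.1 with
        | some i => if kv.2 ≠ "" then acc ++ [(i, kv.1, kv.2)] else acc
        | none => acc) acc = acc ++ l.filterMap pvFB := by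
    intro l
    induction l with
    | nil => simp
    | cons kv rest ih =>
      intro acc
      cases ho : pvOrder.get? kv.1 with
      | none =>
        have hfb : pvFB kv = none := by unfold pvFB; rw [ho]
        simp only [List.foldl_cons, List.filterMap_cons, hfb, ho]
        exact ih acc
      | some i =>
        by_cases hv : kv.2 = ""
        · have hfb : pvFB kv = none := by simp [pvFB, ho, hv]
          simp only [List.foldl_cons, List.filterMap_cons, hfb, ho,
            if_neg (show ¬kv.2 ≠ "" by simp [hv])]
          exact ih acc
        · have hfb : pvFB kv = some (i, kv.1, kv.2) := by unfold pvFB; rw [ho]; simp [hv]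
          simp only [List.foldl_cons, List.filterMap_cons, hfb, ho]
          rw [if_pos (show kv.2 ≠ "" from hv), ih]
          simp
  simpa using h infos []

lemma pvTarget_pairwise (infos : List (String × String)) :
    (pvTarget infos).Pairwise (fun a b => a.1 < b.1) := by
  unfold pvTarget
  rw [List.pairwise_filterMap]
  have hlt : pvIdx.Pairwise (fun a b => a.1 < b.1) := by decide
  refine hlt.imp ?_
  intro a b hab x hx y hy
  rw [(pvTargetF_eq infos a x hx).1, (pvTargetF_eq infos b y hy).1]
  exact hab

lemma pvTarget_key_pairwise (infos : List (String × String)) :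
    (pvTarget infos).Pairwise (fun a b => a.2.1 ≠ b.2.1) := by
  unfold pvTarget
  rw [List.pairwise_filterMap]
  have hne : pvIdx.Pairwise (fun a b => a.2 ≠ b.2) := by decide
  refine hne.imp ?_
  intro a b hab x hx y hy
  rw [(pvTargetF_eq infos a x hx).2, (pvTargetF_eq infos b y hy).2]
  exact hab

lemma mk_get?_iff (infos : List (String × String))
    (hnd : (infos.map Prod.fst).Nodup) (k : String) (v : String) :
    (PySem.Dict.mk infos).get? k = some v ↔ (k, v) ∈ infos :=
  PySem.Dict.get?_eq_some_iff_mem_items (PySem.Dict.mk infos) k v hnd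

lemma mem_pvTarget_iff (infos : List (String × String))
    (hnd : (infos.map Prod.fst).Nodup) (x : Int × String × String) :
    x ∈ pvTarget infos ↔ x ∈ infos.filterMap pvFB := by
  unfold pvTarget
  rw [List.mem_filterMap, List.mem_filterMap]
  constructor
  · rintro ⟨ik, hik, hx⟩
    cases hg : pvG infos ik.2 with
    | none => rw [hg] at hx; cases hx
    | some v =>
      rw [hg] at hx
      cases hx
      unfold pvG at hg
      cases hget : (PySem.Dict.mk infos).get? ik.2 <;> rw [hget] at hg
      · cases hg
      · rename_i w
        by_cases hw : w = ""
        · simp [hw] at hg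
        · simp only [hw, reduceIte, Option.some.injEq] at hg
          subst hg
          refine ⟨(ik.2, w), (mk_get?_iff infos hnd ik.2 w).mp hget, ?_⟩
          unfold pvFB
          rw [(pvOrder_get?_iff ik.2 ik.1).mpr (by cases ik; exact hik)]
          simp [hw]
  · rintro ⟨kv, hkv, hx⟩
    unfold pvFB at hx
    cases ho : pvOrder.get? kv.1 <;> rw [ho] at hx
    · cases hx
    · rename_i i
      by_cases hv : kv.2 = ""
      · simp [hv] at hx
      · simp only [hv, ne_eq, not_false_eq_true, if_true, Option.some.injEq] at hx
        subst hx
        refine ⟨(i, kv.1), (pvOrder_get?_iff kv.1 i).mp ho, ?_⟩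
        have hg : pvG infos kv.1 = some kv.2 := by
          unfold pvG
          rw [(mk_get?_iff infos hnd kv.1 kv.2).mpr (by exact hkv)]
          simp [hv]
        rw [hg]
        rfl

lemma picked_nodup (infos : List (String × String))
    (hnd : (infos.map Prod.fst).Nodup) : (infos.filterMap pvFB).Nodup := by
  have hpw : infos.Pairwise (fun a b => a.1 ≠ b.1) := List.pairwise_map.mp hnd
  show (infos.filterMap pvFB).Pairwise (· ≠ ·)
  rw [List.pairwise_filterMap]
  refine hpw.imp ?_
  intro a b hab x hx y hy heq
  exact hab (pvFB_fst a x hx ▸ pvFB_fst b y hy ▸ congrArg (fun t => t.2.1) heq)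

lemma pvTarget_nodup (infos : List (String × String)) : (pvTarget infos).Nodup :=
  (pvTarget_pairwise infos).imp (fun h heq => absurd (heq ▸ h) (lt_irrefl _))

lemma pvTarget_perm (infos : List (String × String))
    (hnd : (infos.map Prod.fst).Nodup) :
    (pvTarget infos).Perm (infos.filterMap pvFB) :=
  (List.perm_ext_iff_of_nodup (pvTarget_nodup infos) (picked_nodup infos hnd)).mpr
    (mem_pvTarget_iff infos hnd)

lemma sorted_picked (infos : List (String × String))
    (hnd : (infos.map Prod.fst).Nodup) :
    PySem.List.sorted (infos.filterMap pvFB) (fun t => t.1) false = pvTarget infos :=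
  PySem.List.sorted_eq_of_perm_of_pairwise_lt _ _ _ (pvTarget_perm infos hnd)
    (pvTarget_pairwise infos)

-- both results equal the canonical pair list
def pvPairs (infos : List (String × String)) : List (String × String) :=
  pvFieldKeys.filterMap (fun k => (pvG infos k).map (fun v => (k, v)))

lemma pvIdx_snd : pvIdx.map Prod.snd = pvFieldKeys := by decide

lemma target_map_eq_pvPairs (infos : List (String × String)) :
    (pvTarget infos).map (fun t => (t.2.1, t.2.2)) = pvPairs infos := by
  unfold pvTarget pvPairs
  rw [List.map_filterMap, ← pvIdx_snd, List.filterMap_map]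
  congr 1
  funext ik
  cases h : pvG infos ik.2 <;> simp [Function.comp, h]

lemma pvFields_fst : pvFields.map Prod.fst = pvFieldKeys := by decide

lemma A_items (infos : List (String × String)) :
    (pvFields.foldl (fun out kv =>
        match (PySem.Dict.mk infos).get? kv.1 with
        | some val => if val ≠ "" then out.insert kv.1 val else out
        | none => out)
      PySem.Dict.empty).items = pvPairs infos := by
  have hstep : (fun (out : PySem.Dict String String) (kv : String × String) =>
      match (PySem.Dict.mk infos).get? kv.1 with
      | some val => if val ≠ "" then out.insert kv.1 val else out
      | none => out)
      = (fun out kv =>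
      match pvG infos kv.1 with
      | some v => out.insert kv.1 v
      | none => out) := by
    funext out kv
    unfold pvG
    cases (PySem.Dict.mk infos).get? kv.1 with
    | none => rfl
    | some val => by_cases hv : val = "" <;> simp [hv]
  rw [hstep, foldl_condInsert_items (pvG infos) pvFields PySem.Dict.empty (by decide)
        (fun kv _ => by rfl)]
  unfold pvPairs
  rw [← pvFields_fst, List.filterMap_map]
  rfl

lemma B_items (infos : List (String × String)) :
    ((pvTarget infos).foldl (fun d t => d.insert t.2.1 t.2.2) PySem.Dict.empty).items
      = pvPairs infos := by
  have hkeys : ((pvTarget infos).map (fun t => t.2.1)).Nodup := by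
    show ((pvTarget infos).map (fun t => t.2.1)).Pairwise (· ≠ ·)
    rw [List.pairwise_map]
    exact pvTarget_key_pairwise infos
  rw [PySem.Dict.items_foldl_insert_fresh (pvTarget infos) (fun t => t.2.1) (fun t => t.2.2)
        PySem.Dict.empty (fun t _ => rfl) hkeys]
  rw [show (fun (t : Int × String × String) => (t.2.1, t.2.2))
        = (fun t => ((fun (t : Int × String × String) => t.2.1) t,
                     (fun (t : Int × String × String) => t.2.2) t)) from rfl] at *
  simpa using target_map_eq_pvPairs infos

-- ===== VERDICT (by name: the statement is the Claim_ definition above) =====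
theorem format_passport_recognize_infos_spec : Claim_equal_format_passport_recognize_infos := by
  intro infos _ hpre
  unfold Spec_format_passport_recognize_infos
  unfold format_passport_recognize_infos format_passport_recognize_infos_alt
  by_cases hnil : infos = []
  · subst hnil; decide
  · simp only [hnil, if_false]
    rw [A_items infos, picked_eq_filterMap infos, sorted_picked infos hpre,
        B_items infos]
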